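-- pv_equiv track=rewrite | github.com/Paoladevelopment/aithena-roadmap-generation-agent | tutorgpt/roadmap_generation_assistant/tools.py | extract_title_and_description
-- ===== SOURCE A (Python) =====
-- from typing import Dict, Any, List
--
-- def extract_title_and_description(lines: List[str], roadmap: Dict[str, Any]) -> int:
--     """
--     Modifies the roadmap dict in-place to fill in title and description.
--     Returns the line index where objectives start.
--     """
--     for i, line in enumerate(lines):
--         line = line.strip()
--
--         if line.startswith("Roadmap Title:"):
--             roadmap["title"] = line.replace("Roadmap Title:", "").strip()
--         elif line.startswith("Description:"):
--             roadmap["description"] = line.replace("Description:", "").strip()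
--         elif line.startswith("Objective"):
--             return i
--     return len(lines)
-- ===== SOURCE B (Python) =====
-- def extract_title_and_description(lines, roadmap):
--     idx = next((i for i, l in enumerate(lines) if l.strip().startswith("Objective")), len(lines))
--     for line in lines[:idx]:
--         line = line.strip()
--         if line.startswith("Roadmap Title:"):
--             roadmap["title"] = line.replace("Roadmap Title:", "").strip()
--         elif line.startswith("Description:"):
--             roadmap["description"] = line.replace("Description:", "").strip()
--     return idx
-- ===== Notes on version B (the rewrite author's own statement) =====
-- stated objective: alternative
-- what changed: A is one fused loop that parses headers and returns early at the objectives line; B first finds the objectives boundary with next() over an enumerate generator and then parses title/description in a separate loop over lines[:idx] only.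
import Mathlib
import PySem

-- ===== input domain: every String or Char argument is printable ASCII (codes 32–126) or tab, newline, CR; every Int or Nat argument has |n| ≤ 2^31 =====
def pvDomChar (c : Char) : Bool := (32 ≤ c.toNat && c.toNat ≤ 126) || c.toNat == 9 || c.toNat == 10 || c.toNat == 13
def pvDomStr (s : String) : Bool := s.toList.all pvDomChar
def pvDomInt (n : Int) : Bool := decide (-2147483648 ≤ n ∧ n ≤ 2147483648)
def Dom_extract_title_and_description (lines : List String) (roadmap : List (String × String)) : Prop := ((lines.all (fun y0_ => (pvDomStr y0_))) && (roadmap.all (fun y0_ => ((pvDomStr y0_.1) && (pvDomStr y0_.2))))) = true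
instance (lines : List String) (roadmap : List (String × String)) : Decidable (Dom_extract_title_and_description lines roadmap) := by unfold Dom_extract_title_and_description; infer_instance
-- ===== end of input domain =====

-- NOTE: Python A mutates `roadmap` in place; the equivalence proved here is about the RETURN value
-- (the objectives start index) only. B performs the same mutation in Python.

-- ===== PORT A =====
-- A: one fused loop over enumerate(lines): parse title/description branches, return i early at "Objective".
def pvA_loop (total : Nat) : List String → Nat → Int
  | [], _ => (total : Int)
  | l :: rest, i =>
    let s := PySem.Str.strip l
    if PySem.Str.startswith s "Roadmap Title:" then pvA_loop total rest (i + 1)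
    else if PySem.Str.startswith s "Description:" then pvA_loop total rest (i + 1)
    else if PySem.Str.startswith s "Objective" then (i : Int)
    else pvA_loop total rest (i + 1)

def extract_title_and_description (lines : List String) (roadmap : List (String × String)) : Int :=
  pvA_loop lines.length lines 0

-- ===== PORT B =====
-- B: first scan finds the objectives boundary (next() over enumerate, default len(lines));
-- the second Python loop over lines[:idx] only mutates the dict and does not affect the return value.
def pvB_find : List String → Nat
  | [] => 0
  | l :: rest =>
    if PySem.Str.startswith (PySem.Str.strip l) "Objective" then 0 else 1 + pvB_find rest

def extract_title_and_description_alt (lines : List String) (roadmap : List (String × String)) : Int :=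
  (pvB_find lines : Int)

-- ===== PRECONDITION & SPEC =====
def Spec_extract_title_and_description (lines : List String) (roadmap : List (String × String)) (out : Int) : Prop := out = extract_title_and_description_alt lines roadmap
instance (lines : List String) (roadmap : List (String × String)) (out : Int) : Decidable (Spec_extract_title_and_description lines roadmap out) := by unfold Spec_extract_title_and_description; infer_instance

-- ===== CLAIM (what is proved, stated in full; the proofs are below) =====
def Claim_equal_extract_title_and_description : Prop := ∀ (lines : List String) (roadmap : List (String × String)), Dom_extract_title_and_description lines roadmap → Spec_extract_title_and_description lines roadmap (extract_title_and_description lines roadmap)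

-- ===== LEMMAS AND PROOFS =====

theorem pv_head?_of_prefix {L : List Char} {a : Char} {as : List Char}
    (h : (a :: as) <+: L) : L.head? = some a := by
  obtain ⟨t, ht⟩ := h
  subst ht
  simp

theorem pvRT_not_obj {s : String} (h : PySem.Str.startswith s "Roadmap Title:" = true) :
    PySem.Str.startswith s "Objective" = false := by
  by_contra hc
  rw [Bool.not_eq_false, PySem.Str.startswith_eq, PySem.Chars.startswith_iff] at hc
  rw [PySem.Str.startswith_eq, PySem.Chars.startswith_iff] at h
  have e1 : "Roadmap Title:".toList = 'R' :: "oadmap Title:".toList := by decide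
  have e2 : "Objective".toList = 'O' :: "bjective".toList := by decide
  rw [e1] at h; rw [e2] at hc
  have h1 := pv_head?_of_prefix h
  have h2 := pv_head?_of_prefix hc
  rw [h1] at h2
  simp at h2

theorem pvD_not_obj {s : String} (h : PySem.Str.startswith s "Description:" = true) :
    PySem.Str.startswith s "Objective" = false := by
  by_contra hc
  rw [Bool.not_eq_false, PySem.Str.startswith_eq, PySem.Chars.startswith_iff] at hc
  rw [PySem.Str.startswith_eq, PySem.Chars.startswith_iff] at h
  have e1 : "Description:".toList = 'D' :: "escription:".toList := by decide
  have e2 : "Objective".toList = 'O' :: "bjective".toList := by decide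
  rw [e1] at h; rw [e2] at hc
  have h1 := pv_head?_of_prefix h
  have h2 := pv_head?_of_prefix hc
  rw [h1] at h2
  simp at h2

theorem pvB_find_le : ∀ l : List String, pvB_find l ≤ l.length := by
  intro l
  induction l with
  | nil => simp [pvB_find]
  | cons x rest ih =>
    simp only [pvB_find, List.length_cons]
    split <;> omega

set_option maxHeartbeats 1000000 in
theorem pvA_loop_eq : ∀ (l : List String) (i total : Nat),
    pvA_loop total l i =
      if pvB_find l < l.length then ((i + pvB_find l : Nat) : Int) else (total : Int) := by
  intro l
  induction l with
  | nil => intro i total; simp [pvA_loop, pvB_find]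
  | cons x rest ih =>
    intro i total
    simp only [pvA_loop, pvB_find, List.length_cons]
    by_cases hO : PySem.Str.startswith (PySem.Str.strip x) "Objective" = true
    · have hRT : PySem.Str.startswith (PySem.Str.strip x) "Roadmap Title:" = false := by
        by_contra hc
        rw [Bool.not_eq_false] at hc
        have h2 := pvRT_not_obj hc
        rw [hO] at h2
        exact absurd h2 (by simp)
      have hD : PySem.Str.startswith (PySem.Str.strip x) "Description:" = false := by
        by_contra hc
        rw [Bool.not_eq_false] at hc
        have h2 := pvD_not_obj hc
        rw [hO] at h2
        exact absurd h2 (by simp)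
      rw [hRT, hD, hO]
      simp
    · rw [Bool.not_eq_true] at hO
      rw [hO]
      simp only [Bool.false_eq_true, if_false]
      have h1 : (if PySem.Str.startswith (PySem.Str.strip x) "Roadmap Title:" = true
          then pvA_loop total rest (i + 1)
          else if PySem.Str.startswith (PySem.Str.strip x) "Description:" = true
            then pvA_loop total rest (i + 1)
            else pvA_loop total rest (i + 1)) = pvA_loop total rest (i + 1) := by
        split_ifs <;> rfl
      rw [h1, ih]
      by_cases h : pvB_find rest < rest.length
      · rw [if_pos h, if_pos (show 1 + pvB_find rest < rest.length + 1 by omega)]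
        congr 1
        omega
      · rw [if_neg h, if_neg (show ¬ (1 + pvB_find rest < rest.length + 1) by omega)]

-- ===== VERDICT (by name: the statement is the Claim_ definition above) =====
theorem extract_title_and_description_spec : Claim_equal_extract_title_and_description := by
  intro lines roadmap _
  unfold Spec_extract_title_and_description extract_title_and_description extract_title_and_description_alt
  rw [pvA_loop_eq]
  have hle := pvB_find_le lines
  split_ifs with h
  · simp
  · congr 1; omega
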